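-- pv_equiv track=rewrite | github.com/K-Y-k/Coding_Test_Python_SQL | 프로그래머스/lv3/숫자 게임-힙.py | solution
-- ===== SOURCE A (Python) =====
-- def solution(A, B):
--     answer = 0
--
--     for i in A:
--         for j in range(i+1, max(B)+1):
--             if j in B:
--                 answer += 1
--                 B.remove(j)
--
--
--     return answer
-- ===== SOURCE B (Python) =====
-- def solution(A, B):
--     remaining = {}
--     for b in B:
--         remaining[b] = remaining.get(b, 0) + 1
--     values = list(remaining)
--     answer = 0
--     for a in A:
--         kept = []
--         for v in values:
--             if v <= a:
--                 kept.append(v)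
--             else:
--                 answer += 1
--                 remaining[v] -= 1
--                 if remaining[v]:
--                     kept.append(v)
--         values = kept
--     return answer
-- ===== Notes on version B (the rewrite author's own statement) =====
-- stated objective: faster
-- what changed: B builds a value->count dictionary of B once and, per element of A, makes one pass over the surviving distinct values (counting and decrementing those above it), instead of A's scan of every integer j in (i, max(B)] with a linear 'j in B' membership test and list.remove per hit; Pre_ excludes exactly the inputs on which A raises ValueError (max() of an empty list once B is exhausted).
import Mathlib
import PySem

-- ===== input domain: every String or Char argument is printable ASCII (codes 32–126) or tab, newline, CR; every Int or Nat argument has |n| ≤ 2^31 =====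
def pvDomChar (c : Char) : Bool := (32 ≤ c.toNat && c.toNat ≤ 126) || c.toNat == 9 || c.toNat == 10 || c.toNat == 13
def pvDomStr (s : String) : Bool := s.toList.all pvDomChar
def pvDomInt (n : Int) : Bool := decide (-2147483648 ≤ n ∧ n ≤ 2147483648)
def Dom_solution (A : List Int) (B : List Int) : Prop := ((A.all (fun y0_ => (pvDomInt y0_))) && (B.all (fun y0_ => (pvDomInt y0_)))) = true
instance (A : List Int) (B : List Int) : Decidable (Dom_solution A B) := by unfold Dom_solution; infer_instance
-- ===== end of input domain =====

-- B replaces A's scan of the whole numeric range (i, max(B)] with one pass over a value→count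
-- dictionary (objective: faster). A mutates its argument B in place (list.remove); B does not —
-- the equivalence proved here is about the return value only.

-- ===== PORT A =====
-- inner loop body: 'if j in B: answer += 1; B.remove(j)'
def innerStepA (st : Int × List Int) (j : Int) : Int × List Int :=
  if j ∈ st.2 then (st.1 + 1, (PySem.List.remove? st.2 j).getD st.2) else st

-- 'for i in A: for j in range(i+1, max(B)+1): …'; none = the ValueError of max([]) on an empty B
def loopA : List Int → List Int → Int → Option Int
  | [], _, ans => some ans
  | i :: rest, Bl, ans =>
    match PySem.List.max? Bl (fun x => x) with
    | none => none
    | some m =>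
      let st := (PySem.List.pyRange (i + 1) (m + 1) 1).foldl innerStepA (ans, Bl)
      loopA rest st.2 st.1

def solution (A : List Int) (B : List Int) : Int := (loopA A B 0).getD 0

-- ===== PORT B =====
-- 'remaining = {}; for b in B: remaining[b] = remaining.get(b, 0) + 1'
def countDictB (B : List Int) : PySem.Dict Int Int :=
  B.foldl (fun d b => d.insert b (d.getD b 0 + 1)) PySem.Dict.empty

-- loop body over the surviving distinct values: state = (kept, remaining, answer)
def stepB (a : Int) (st : List Int × PySem.Dict Int Int × Int) (v : Int) :
    List Int × PySem.Dict Int Int × Int :=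
  if v ≤ a then (st.1 ++ [v], st.2.1, st.2.2)
  else
    let c := st.2.1.getD v 0 - 1
    let cnt' := st.2.1.insert v c
    if c ≠ 0 then (st.1 ++ [v], cnt', st.2.2 + 1) else (st.1, cnt', st.2.2 + 1)

-- 'for a in A: kept = [] …; values = kept'
def loopB : List Int → List Int → PySem.Dict Int Int → Int → Int
  | [], _, _, ans => ans
  | a :: rest, vals, cnt, ans =>
    let st := vals.foldl (stepB a) ([], cnt, ans)
    loopB rest st.1 st.2.1 st.2.2

def solution_alt (A : List Int) (B : List Int) : Int :=
  let cnt := countDictB B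
  loopB A (PySem.Dict.keys cnt) cnt 0

-- ===== PRECONDITION & SPEC =====
-- Pre_ excludes exactly the inputs on which the Python A raises ValueError (max() of an empty
-- sequence): before every step of the loop over A some value of B must still have copies left,
-- i.e. more copies than there are A-prefix elements below it. B returns a value there.
def Pre_solution (A : List Int) (B : List Int) : Prop :=
  A = [] ∨ ∀ k ∈ List.range A.length, ∃ v ∈ B, ((A.take k).countP (fun i => i < v)) < B.count v
instance (A : List Int) (B : List Int) : Decidable (Pre_solution A B) := by
  unfold Pre_solution; infer_instance
def pvWitness_solution : List Int × List Int := ([1, 2], [2, 2, 3])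

def Spec_solution (A : List Int) (B : List Int) (out : Int) : Prop := out = solution_alt A B
instance (A : List Int) (B : List Int) (out : Int) : Decidable (Spec_solution A B out) := by unfold Spec_solution; infer_instance

-- ===== CLAIM (what is proved, stated in full; the proofs are below) =====
def Claim_equal_solution : Prop := ∀ (A : List Int) (B : List Int), Dom_solution A B → Pre_solution A B → Spec_solution A B (solution A B)

-- ===== LEMMAS AND PROOFS =====

-- the state relation: the multiset A keeps as the list Bl is, on B's side, the distinct list
-- vals together with the counter cnt
def InvAB (Bl vals : List Int) (cnt : PySem.Dict Int Int) : Prop :=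
  vals.Nodup ∧ (∀ v, v ∈ vals ↔ v ∈ Bl) ∧ (∀ v ∈ vals, cnt.getD v 0 = (Bl.count v : Int))

-- A's inner loop over a duplicate-free list of candidates: it counts the candidates present in
-- Bl and erases one occurrence of each
lemma innerA_spec (js : List Int) (hnd : js.Nodup) : ∀ (Bl : List Int) (ans : Int),
    (js.foldl innerStepA (ans, Bl)).1
      = ans + ((js.filter (fun j => decide (j ∈ Bl))).length : Int) ∧
    ∀ v, (js.foldl innerStepA (ans, Bl)).2.count v
      = Bl.count v - (if v ∈ js ∧ v ∈ Bl then 1 else 0) := by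
  induction js with
  | nil => intro Bl ans; simp
  | cons j rest ih =>
    intro Bl ans
    have hj : j ∉ rest := (List.nodup_cons.mp hnd).1
    have hrest := (List.nodup_cons.mp hnd).2
    by_cases hmem : j ∈ Bl
    · have hrem : PySem.List.remove? Bl j = some (Bl.erase j) :=
        PySem.List.remove?_eq_some_erase Bl j hmem
      simp only [List.foldl_cons, innerStepA, hmem, if_pos, hrem, Option.getD_some]
      obtain ⟨h1, h2⟩ := ih hrest (Bl.erase j) (ans + 1)
      constructor
      · rw [h1]
        have : rest.filter (fun x => decide (x ∈ Bl.erase j))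
            = rest.filter (fun x => decide (x ∈ Bl)) := by
          apply List.filter_congr
          intro x hx
          have hxj : x ≠ j := fun h => hj (h ▸ hx)
          simp [List.mem_erase_of_ne hxj]
        rw [this]
        simp [hmem]
        ring
      · intro v
        rw [h2 v]
        by_cases hvj : v = j
        · subst hvj
          simp [hj, List.count_erase_self, hmem]
        · rw [List.count_erase_of_ne hvj]
          have : v ∈ Bl.erase j ↔ v ∈ Bl := List.mem_erase_of_ne hvj
          simp [this, hvj]
    · simp only [List.foldl_cons, innerStepA, hmem, if_false]
      obtain ⟨h1, h2⟩ := ih hrest Bl ans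
      constructor
      · rw [h1]; simp [hmem]
      · intro v
        rw [h2 v]
        by_cases hvj : v = j
        · subst hvj; simp [hmem]
        · simp [hvj]

-- B's inner loop: it counts the values above a, decrements their counts, and keeps exactly the
-- values that are ≤ a or still have copies left
lemma innerB_spec (a : Int) (vals : List Int) (hnd : vals.Nodup) :
    ∀ (pre : List Int) (cnt : PySem.Dict Int Int) (ans : Int),
    (vals.foldl (stepB a) (pre, cnt, ans)).2.2
      = ans + ((vals.filter (fun v => decide (a < v))).length : Int) ∧
    (vals.foldl (stepB a) (pre, cnt, ans)).1
      = pre ++ vals.filter (fun v => decide (v ≤ a) || decide (cnt.getD v 0 ≠ 1)) ∧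
    ∀ v, (vals.foldl (stepB a) (pre, cnt, ans)).2.1.getD v 0
      = if a < v ∧ v ∈ vals then cnt.getD v 0 - 1 else cnt.getD v 0 := by
  induction vals with
  | nil => intro pre cnt ans; simp
  | cons w rest ih =>
    intro pre cnt ans
    have hw : w ∉ rest := (List.nodup_cons.mp hnd).1
    have hrest := (List.nodup_cons.mp hnd).2
    by_cases hle : w ≤ a
    · simp only [List.foldl_cons, stepB, hle, if_pos]
      obtain ⟨h1, h2, h3⟩ := ih hrest (pre ++ [w]) cnt ans
      refine ⟨?_, ?_, ?_⟩
      · rw [h1]; simp [not_lt.mpr hle]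
      · rw [h2]; simp [hle]
      · intro v
        rw [h3 v]
        by_cases hvw : v = w
        · subst hvw; simp [hw, not_lt.mpr hle]
        · simp [hvw]
    · have hlt : a < w := not_le.mp hle
      simp only [List.foldl_cons, stepB, hle, if_false]
      set c := cnt.getD w 0 - 1 with hc
      by_cases hcz : c ≠ 0
      · rw [if_pos hcz]
        obtain ⟨h1, h2, h3⟩ := ih hrest (pre ++ [w]) (cnt.insert w c) (ans + 1)
        refine ⟨?_, ?_, ?_⟩
        · rw [h1]; simp [hlt]; push_cast; ring
        · rw [h2]
          have : rest.filter (fun v => decide (v ≤ a) || decide ((cnt.insert w c).getD v 0 ≠ 1))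
              = rest.filter (fun v => decide (v ≤ a) || decide (cnt.getD v 0 ≠ 1)) := by
            apply List.filter_congr
            intro x hx
            have hxw : x ≠ w := fun h => hw (h ▸ hx)
            rw [PySem.Dict.getD_insert]
            simp [hxw]
          rw [this]
          simp [List.filter_cons, hle, hc]
          omega
        · intro v
          rw [h3 v]
          by_cases hvw : v = w
          · subst hvw
            simp [hw, hlt, PySem.Dict.getD_insert, hc]
          · rw [PySem.Dict.getD_insert]
            simp [hvw]
      · rw [if_neg hcz]
        obtain ⟨h1, h2, h3⟩ := ih hrest pre (cnt.insert w c) (ans + 1)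
        refine ⟨?_, ?_, ?_⟩
        · rw [h1]; simp [hlt]; push_cast; ring
        · rw [h2]
          have : rest.filter (fun v => decide (v ≤ a) || decide ((cnt.insert w c).getD v 0 ≠ 1))
              = rest.filter (fun v => decide (v ≤ a) || decide (cnt.getD v 0 ≠ 1)) := by
            apply List.filter_congr
            intro x hx
            have hxw : x ≠ w := fun h => hw (h ▸ hx)
            rw [PySem.Dict.getD_insert]
            simp [hxw]
          rw [this]
          have hc1 : cnt.getD w 0 = 1 := by omega
          simp [hle, hc1]
        · intro v
          rw [h3 v]
          by_cases hvw : v = w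
          · subst hvw
            simp [hw, hlt, PySem.Dict.getD_insert, hc]
          · rw [PySem.Dict.getD_insert]
            simp [hvw]

lemma loopAB_eq : ∀ (As Bl vals : List Int) (cnt : PySem.Dict Int Int) (ans : Int),
    InvAB Bl vals cnt →
    (∀ k, k < As.length → ∃ v ∈ Bl, ((As.take k).countP (fun i => i < v)) < Bl.count v) →
    loopA As Bl ans = some (loopB As vals cnt ans) := by
  intro As
  induction As with
  | nil => intro Bl vals cnt ans _ _; rfl
  | cons a rest ih =>
    intro Bl vals cnt ans hinv hpre
    obtain ⟨hnd, hmem, hcnt⟩ := hinv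
    have hBl : Bl ≠ [] := by
      obtain ⟨v, hv, _⟩ := hpre 0 (by simp)
      exact fun h => by simp [h] at hv
    obtain ⟨m, hm⟩ : ∃ m, PySem.List.max? Bl (fun x => x) = some m := by
      cases h : PySem.List.max? Bl (fun x => x) with
      | none => exact absurd ((PySem.List.max?_eq_none_iff _ _).mp h) hBl
      | some m => exact ⟨m, rfl⟩
    have hmMax : ∀ y ∈ Bl, y ≤ m := fun y hy => PySem.List.max?_isMax hm y hy
    have hndjs : (PySem.List.pyRange (a + 1) (m + 1) 1).Nodup := PySem.List.nodup_pyRange_one _ _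
    obtain ⟨hA1, hA2⟩ := innerA_spec _ hndjs Bl ans
    obtain ⟨hB1, hB2, hB3⟩ := innerB_spec a vals hnd [] cnt ans
    -- the two counted sets coincide
    have hsets : ∀ x, (x ∈ (PySem.List.pyRange (a + 1) (m + 1) 1).filter (fun j => decide (j ∈ Bl)))
        ↔ (x ∈ vals.filter (fun v => decide (a < v))) := by
      intro x
      simp only [List.mem_filter, PySem.List.mem_pyRange_one, decide_eq_true_eq]
      constructor
      · rintro ⟨⟨h1, _⟩, h3⟩
        exact ⟨(hmem x).mpr h3, by omega⟩
      · rintro ⟨h1, h2⟩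
        have hxB := (hmem x).mp h1
        exact ⟨⟨by omega, by have := hmMax x hxB; omega⟩, hxB⟩
    have hlen : ((PySem.List.pyRange (a + 1) (m + 1) 1).filter (fun j => decide (j ∈ Bl))).length
        = (vals.filter (fun v => decide (a < v))).length :=
      ((List.perm_ext_iff_of_nodup (hndjs.filter _) (hnd.filter _)).mpr hsets).length_eq
    -- counts in A's new list: one copy of every value above a disappears
    have hAcount : ∀ v, ((PySem.List.pyRange (a + 1) (m + 1) 1).foldl innerStepA (ans, Bl)).2.count v
        = Bl.count v - (if a < v ∧ v ∈ Bl then 1 else 0) := by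
      intro v
      rw [hA2 v]
      by_cases hvB : v ∈ Bl
      · by_cases hav : a < v
        · have : v ∈ PySem.List.pyRange (a + 1) (m + 1) 1 := by
            rw [PySem.List.mem_pyRange_one]
            have := hmMax v hvB; omega
          simp [this, hvB, hav]
        · have : v ∉ PySem.List.pyRange (a + 1) (m + 1) 1 := by
            rw [PySem.List.mem_pyRange_one]; omega
          simp [this, hvB, hav]
      · simp [hvB]
    -- the nonemptiness hypothesis carries to the next step
    have hpre' : ∀ k, k < rest.length →
        ∃ v ∈ ((PySem.List.pyRange (a + 1) (m + 1) 1).foldl innerStepA (ans, Bl)).2,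
          ((rest.take k).countP (fun i => i < v))
            < ((PySem.List.pyRange (a + 1) (m + 1) 1).foldl innerStepA (ans, Bl)).2.count v := by
      intro k hk
      obtain ⟨v, hvB, hvc⟩ := hpre (k + 1) (by simpa using Nat.succ_lt_succ hk)
      have hcount := hAcount v
      have htake : ((a :: rest).take (k + 1)).countP (fun i => i < v)
          = (if a < v then 1 else 0) + (rest.take k).countP (fun i => i < v) := by
        simp [List.take_succ_cons, List.countP_cons]
        split_ifs <;> omega
      rw [htake] at hvc
      have hif : (if a < v ∧ v ∈ Bl then (1 : Nat) else 0) = (if a < v then 1 else 0) := by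
        by_cases hav : a < v <;> simp [hav, hvB]
      rw [hif] at hcount
      have hkey : ((rest.take k).countP (fun i => i < v))
          < ((PySem.List.pyRange (a + 1) (m + 1) 1).foldl innerStepA (ans, Bl)).2.count v := by
        rw [hcount]; split_ifs at hvc ⊢ <;> omega
      exact ⟨v, List.count_pos_iff.mp (Nat.lt_of_le_of_lt (Nat.zero_le _) hkey), hkey⟩
    -- the invariant carries to the two updated states
    have hinv' : InvAB ((PySem.List.pyRange (a + 1) (m + 1) 1).foldl innerStepA (ans, Bl)).2
        (vals.foldl (stepB a) ([], cnt, ans)).1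
        (vals.foldl (stepB a) ([], cnt, ans)).2.1 := by
      rw [hB2]
      refine ⟨by simpa using hnd.filter _, ?_, ?_⟩
      · intro v
        rw [List.nil_append, List.mem_filter]
        have hBl' := hAcount v
        constructor
        · rintro ⟨hv, hcond⟩
          have hvB := (hmem v).mp hv
          have hc := hcnt v hv
          have hpos : 0 < Bl.count v := List.count_pos_iff.mpr hvB
          simp only [Bool.or_eq_true, decide_eq_true_eq] at hcond
          rw [← List.count_pos_iff, hBl']
          rcases hcond with h | h
          · have : ¬ (a < v) := by omega
            simp [this]; omega
          · by_cases hav : a < v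
            · have : Bl.count v ≠ 1 := by
                intro hone; rw [hone] at hc; simp at hc; exact h (by omega)
              simp [hav, hvB]; omega
            · simp [hav]; omega
        · intro hv
          have hpos : 0 < (((PySem.List.pyRange (a + 1) (m + 1) 1).foldl innerStepA (ans, Bl)).2.count v) :=
            List.count_pos_iff.mpr hv
          rw [hBl'] at hpos
          have hvB : v ∈ Bl := by
            by_contra hnB
            simp [List.count_eq_zero_of_not_mem hnB] at hpos
          refine ⟨(hmem v).mpr hvB, ?_⟩
          simp only [Bool.or_eq_true, decide_eq_true_eq]
          by_cases hav : a < v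
          · right
            have hc := hcnt v ((hmem v).mpr hvB)
            simp [hav, hvB] at hpos
            omega
          · left; omega
      · intro v hv
        rw [List.nil_append, List.mem_filter] at hv
        obtain ⟨hvv, hcond⟩ := hv
        have hvB := (hmem v).mp hvv
        have hc := hcnt v hvv
        have hpos : 0 < Bl.count v := List.count_pos_iff.mpr hvB
        rw [hB3 v, hAcount v]
        by_cases hav : a < v
        · simp only [hav, hvB, and_self, if_pos, hvv]
          rw [hc]
          have h1 : (1:Nat) ≤ Bl.count v := hpos
          push_cast [Nat.cast_sub h1]
          ring
        · simp [hav, hc]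
    calc loopA (a :: rest) Bl ans
        = loopA rest ((PySem.List.pyRange (a + 1) (m + 1) 1).foldl innerStepA (ans, Bl)).2
            ((PySem.List.pyRange (a + 1) (m + 1) 1).foldl innerStepA (ans, Bl)).1 := by
          simp only [loopA, hm]
      _ = some (loopB rest (vals.foldl (stepB a) ([], cnt, ans)).1
            (vals.foldl (stepB a) ([], cnt, ans)).2.1
            (vals.foldl (stepB a) ([], cnt, ans)).2.2) := by
          rw [hA1, hB1, hlen]
          exact ih _ _ _ _ hinv' hpre'
      _ = some (loopB (a :: rest) vals cnt ans) := by
          rw [loopB]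

-- the counter dictionary and its key list satisfy the invariant against the original B
lemma invAB_init (B : List Int) :
    InvAB B (PySem.Dict.keys (countDictB B)) (countDictB B) := by
  have hc : countDictB B = PySem.Dict.counter B :=
    PySem.Dict.foldl_insert_getD_add_one_eq_counter B
  rw [hc]
  refine ⟨?_, ?_, ?_⟩
  · rw [PySem.Dict.keys_counter]
    exact PySem.Set.nodup_ofList B
  · intro v
    rw [PySem.Dict.keys_counter]
    exact PySem.Set.mem_ofList B v
  · intro v _
    exact PySem.Dict.getD_counter B v

-- ===== VERDICT (by name: the statement is the Claim_ definition above) =====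
theorem solution_spec : Claim_equal_solution := by
  intro A B _ hpre
  unfold Spec_solution solution solution_alt
  have hp : ∀ k, k < A.length → ∃ v ∈ B, ((A.take k).countP (fun i => i < v)) < B.count v := by
    rcases hpre with h | h
    · subst h; intro k hk; simp at hk
    · intro k hk; exact h k (List.mem_range.mpr hk)
  rw [loopAB_eq A B _ _ 0 (invAB_init B) hp]
  rfl
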